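-- pv_equiv track=rewrite | github.com/sbrahma0/optimised-Python | competitive_game.py | countLevelUpPlayers
-- ===== SOURCE A (Python) =====
-- def countLevelUpPlayers(cutOffRank, num, scores):
--     count={}
--     if num>=100000:
--       return
--     for score in sorted(scores,reverse=True):
--         if score in count:
--             count[score] += 1
--         else:
--             count[score] = 1
--
--     ans, current = 0,1
--     for i in count:
--         if current>cutOffRank:
--             break
--         current += count[i]
--         ans += count[i]
--     return ans
-- ===== SOURCE B (Python) =====
-- def countLevelUpPlayers(cutOffRank, num, scores):
--     if num >= 100000:
--         return
--     n = len(scores)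
--     if cutOffRank <= 0:
--         return 0
--     if cutOffRank >= n:
--         return n
--     pivot = sorted(scores, reverse=True)[cutOffRank - 1]
--     return sum(1 for x in scores if x >= pivot)
-- ===== Notes on version B (the rewrite author's own statement) =====
-- stated objective: alternative
-- what changed: Instead of grouping tied scores in an ordered frequency dict and accumulating group sizes rank by rank, B computes the pivot score at position cutOffRank in the descending order and counts, in one comparison pass over the unsorted input, the players whose score is at least that pivot (with direct answers 0 and n when cutOffRank is out of [1,n)).
import Mathlib
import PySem

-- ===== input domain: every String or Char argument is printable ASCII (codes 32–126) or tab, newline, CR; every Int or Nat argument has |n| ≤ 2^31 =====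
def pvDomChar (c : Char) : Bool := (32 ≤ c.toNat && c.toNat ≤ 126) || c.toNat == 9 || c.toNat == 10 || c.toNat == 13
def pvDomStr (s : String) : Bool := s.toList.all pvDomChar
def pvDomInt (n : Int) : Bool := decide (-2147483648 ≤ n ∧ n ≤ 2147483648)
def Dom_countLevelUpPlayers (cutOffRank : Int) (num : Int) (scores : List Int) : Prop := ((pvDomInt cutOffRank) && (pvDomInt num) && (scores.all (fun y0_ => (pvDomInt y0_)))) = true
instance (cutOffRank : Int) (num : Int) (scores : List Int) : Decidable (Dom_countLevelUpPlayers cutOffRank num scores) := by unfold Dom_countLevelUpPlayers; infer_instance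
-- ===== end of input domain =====

-- B replaces A's ordered frequency dict and rank-accumulating walk by a pivot
-- selection (the score at position cutOffRank of the descending order) followed
-- by one comparison pass counting scores ≥ pivot (objective: alternative).

-- ===== PORT A =====
-- the `for score in sorted(...)` counting loop body
def pvCountStep (d : PySem.Dict Int Int) (score : Int) : PySem.Dict Int Int :=
  if d.contains score then d.insert score (d.getD score 0 + 1) else d.insert score 1

-- `for i in count: ...` — iterating the dict yields its keys in insertion order with
-- count[i] the paired value (dict keys are unique), i.e. a walk over d.items
def pvALoop (cutOffRank : Int) : List (Int × Int) → Int → Int → Int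
  | [], ans, _ => ans
  | (_, c) :: rest, ans, current =>
    if current > cutOffRank then ans
    else pvALoop cutOffRank rest (ans + c) (current + c)

def countLevelUpPlayers (cutOffRank : Int) (num : Int) (scores : List Int) : Option Int :=
  if num ≥ 100000 then none
  else
    let count := (PySem.List.sorted scores (fun x => x) true).foldl pvCountStep PySem.Dict.empty
    some (pvALoop cutOffRank count.items 0 1)

-- ===== PORT B =====
def countLevelUpPlayers_alt (cutOffRank : Int) (num : Int) (scores : List Int) : Option Int :=
  if num ≥ 100000 then none
  else
    let n : Int := scores.length
    if cutOffRank ≤ 0 then some 0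
    else if cutOffRank ≥ n then some n
    else
      -- pivot = sorted(scores, reverse=True)[cutOffRank - 1]; here 1 ≤ cutOffRank < n,
      -- so the index is in range and pyGet? is some; .getD 0 only totalises the access
      let pivot := (PySem.List.pyGet? (PySem.List.sorted scores (fun x => x) true) (cutOffRank - 1)).getD 0
      -- sum(1 for x in scores if x >= pivot)
      some ((scores.filter (fun x => pivot ≤ x)).length : Int)

-- ===== PRECONDITION & SPEC =====
def Spec_countLevelUpPlayers (cutOffRank : Int) (num : Int) (scores : List Int) (out : Option Int) : Prop := out = countLevelUpPlayers_alt cutOffRank num scores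
instance (cutOffRank : Int) (num : Int) (scores : List Int) (out : Option Int) : Decidable (Spec_countLevelUpPlayers cutOffRank num scores out) := by unfold Spec_countLevelUpPlayers; infer_instance

-- ===== CLAIM (what is proved, stated in full; the proofs are below) =====
def Claim_equal_countLevelUpPlayers : Prop := ∀ (cutOffRank : Int) (num : Int) (scores : List Int), Dom_countLevelUpPlayers cutOffRank num scores → Spec_countLevelUpPlayers cutOffRank num scores (countLevelUpPlayers cutOffRank num scores)

-- ===== LEMMAS AND PROOFS =====

-- #{y ∈ l : y > x}, the number of strictly better scores
def pvGt (l : List Int) (x : Int) : Int := ((l.filter (fun y => decide (x < y))).length : Int)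

-- #{x ∈ l : i + pvGt l x < k} — the elements of rank ≤ k once i better ones are before l
def pvCntI (k i : Int) (l : List Int) : Int :=
  ((l.filter (fun x => decide (i + pvGt l x < k))).length : Int)

theorem pvGt_nonneg (l : List Int) (x : Int) : 0 ≤ pvGt l x := Int.natCast_nonneg _

theorem pvALoop_nil (k ans cur : Int) : pvALoop k [] ans cur = ans := rfl

theorem pvALoop_cons (k v c : Int) (rest : List (Int × Int)) (ans cur : Int) :
    pvALoop k ((v, c) :: rest) ans cur
      = if cur > k then ans else pvALoop k rest (ans + c) (cur + c) := rfl

-- A's counting step is the standard counter step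
theorem pvCountStep_eq (d : PySem.Dict Int Int) (x : Int) :
    pvCountStep d x = d.insert x (d.getD x 0 + 1) := by
  unfold pvCountStep
  by_cases h : d.contains x
  · simp [h]
  · have hc : d.contains x = false := by simpa using h
    rw [if_neg (by simp [hc]), PySem.Dict.getD_of_not_contains d 0 hc]
    norm_num

theorem pvCounter_eq (l : List Int) :
    l.foldl pvCountStep PySem.Dict.empty = PySem.Dict.counter l := by
  have : pvCountStep = fun (d : PySem.Dict Int Int) x => d.insert x (d.getD x 0 + 1) := by
    funext d x; exact pvCountStep_eq d x
  rw [this, PySem.Dict.foldl_insert_getD_add_one_eq_counter]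

-- discard on an ofList is ofList of the filtered list
theorem discard_ofList (m : List Int) (v : Int) :
    (PySem.Set.ofList m).discard v = PySem.Set.ofList (m.filter (fun y => !(y == v))) := by
  induction m with
  | nil => rfl
  | cons x m ih =>
    rw [PySem.Set.ofList_cons]
    simp only [PySem.Set.discard] at ih ⊢
    by_cases hxv : x = v
    · subst hxv
      simp [ih]
    · have hx : (x == v) = false := by simpa using hxv
      simp only [List.filter_cons, hx, Bool.not_false, if_true]
      rw [PySem.Set.ofList_cons]
      simp only [PySem.Set.discard]
      rw [← ih]
      simp only [List.filter_filter]
      congr 2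
      funext y
      rw [Bool.and_comm]

-- no element of a descending list beats its head
theorem pvGt_head_zero (v : Int) (rest : List Int) (hvle : ∀ x ∈ rest, x ≤ v) :
    pvGt (v :: rest) v = 0 := by
  unfold pvGt
  rw [List.filter_eq_nil_iff.mpr]
  · rfl
  · intro y hy
    rcases List.mem_cons.mp hy with h | h
    · simp [h]
    · simpa using not_lt_of_ge (hvle y h)

-- one tie-group step of the count: the v-run passes whole, the tail's ranks shift
theorem pvCntI_cons (k i v : Int) (run rest' : List Int)
    (hrunv : ∀ x ∈ run, x = v) (hlt' : ∀ x ∈ rest', x < v) (hik : i + 1 ≤ k) :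
    pvCntI k i (v :: (run ++ rest'))
      = ((1 + run.length : Nat) : Int) + pvCntI k (i + ((1 + run.length : Nat) : Int)) rest' := by
  have hall : ∀ x ∈ run ++ rest', x ≤ v := by
    intro x hx
    rcases List.mem_append.mp hx with h | h
    · exact le_of_eq (hrunv x h)
    · exact le_of_lt (hlt' x h)
  have hgv : pvGt (v :: (run ++ rest')) v = 0 := pvGt_head_zero v (run ++ rest') hall
  have hgt : ∀ x ∈ rest',
      pvGt (v :: (run ++ rest')) x = ((1 + run.length : Nat) : Int) + pvGt rest' x := by
    intro x hx
    unfold pvGt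
    have hxv : (decide (x < v)) = true := by simpa using hlt' x hx
    rw [List.filter_cons, List.filter_append]
    have hfr : run.filter (fun y => decide (x < y)) = run := by
      rw [List.filter_eq_self]
      intro a ha
      rw [hrunv a ha]; exact hxv
    rw [hfr, hxv, if_pos rfl]
    simp only [List.length_cons, List.length_append]
    push_cast
    ring
  unfold pvCntI
  have hv' : (decide (i + pvGt (v :: (run ++ rest')) v < k)) = true := by
    rw [hgv]
    simp only [decide_eq_true_eq]
    omega
  have hfr : run.filter (fun x => decide (i + pvGt (v :: (run ++ rest')) x < k)) = run := by
    rw [List.filter_eq_self]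
    intro a ha
    rw [hrunv a ha]; exact hv'
  have hft : rest'.filter (fun x => decide (i + pvGt (v :: (run ++ rest')) x < k))
      = rest'.filter (fun x => decide (i + ((1 + run.length : Nat) : Int) + pvGt rest' x < k)) := by
    apply List.filter_congr
    intro x hx
    rw [hgt x hx, decide_eq_decide]
    constructor <;> intro h <;> omega
  rw [List.filter_cons, List.filter_append, hv', hfr, hft, if_pos rfl]
  simp only [List.length_cons, List.length_append]
  push_cast
  ring

-- the A loop over the (distinct score, multiplicity) items of a descending list
-- computes i + #{x : rank of x ≤ k}  (ans = i consumed elements, current = i + 1)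
theorem pv_loop_cnt (k : Int) : ∀ (n : Nat) (l : List Int), l.length ≤ n →
    l.Pairwise (fun a b => b ≤ a) → ∀ i : Int,
    pvALoop k ((PySem.Set.ofList l).map (fun v => (v, (List.count v l : Int)))) i (i + 1)
      = i + pvCntI k i l := by
  intro n
  induction n with
  | zero =>
    intro l hl _ i
    cases l with
    | nil => simp [pvALoop_nil, PySem.Set.ofList_nil, pvCntI]
    | cons a t => exact absurd hl (by simp)
  | succ n ih =>
    intro l hl hp i
    cases l with
    | nil => simp [pvALoop_nil, PySem.Set.ofList_nil, pvCntI]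
    | cons v rest =>
      have hvle : ∀ x ∈ rest, x ≤ v := (List.pairwise_cons.mp hp).1
      have hprest : rest.Pairwise (fun a b => b ≤ a) := (List.pairwise_cons.mp hp).2
      set run := rest.takeWhile (fun x => x == v) with hrun
      set rest' := rest.dropWhile (fun x => x == v) with hrest'
      have hsplit : run ++ rest' = rest := List.takeWhile_append_dropWhile
      have hrunv : ∀ x ∈ run, x = v := by
        intro x hx
        simpa using List.mem_takeWhile_imp hx
      have hprest' : rest'.Pairwise (fun a b => b ≤ a) :=
        hprest.sublist (List.dropWhile_sublist _)
      have hvnot : v ∉ rest' := by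
        intro hv
        cases hhead : rest' with
        | nil => rw [hhead] at hv; exact absurd hv (List.not_mem_nil)
        | cons w t =>
          have hwne : ¬ (w == v) = true := by
            have := List.head?_dropWhile_not (fun x => x == v) rest
            rw [← hrest', hhead] at this
            simpa using this
          have hwv : w ≠ v := by simpa using hwne
          have hwlev : w ≤ v := hvle w (by
            rw [← hsplit, hhead]; exact List.mem_append_right _ List.mem_cons_self)
          have hwlt : w < v := lt_of_le_of_ne hwlev hwv
          rw [hhead] at hv
          rcases List.mem_cons.mp hv with h | h
          · exact hwv h.symm
          · have : v ≤ w := by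
              rw [hhead] at hprest'
              exact (List.pairwise_cons.mp hprest').1 v h
            exact absurd (lt_of_le_of_lt this hwlt) (lt_irrefl v)
      have hlt' : ∀ x ∈ rest', x < v := by
        intro x hx
        refine lt_of_le_of_ne (hvle x ((hsplit ▸ List.mem_append_right run hx))) ?_
        intro h; exact hvnot (h ▸ hx)
      -- the set of (v :: rest) is v followed by the set of rest'
      have hset : PySem.Set.ofList (v :: rest) = v :: PySem.Set.ofList rest' := by
        rw [PySem.Set.ofList_cons, discard_ofList]
        congr 1
        rw [← hsplit, List.filter_append]
        have h1 : run.filter (fun y => !(y == v)) = [] := by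
          rw [List.filter_eq_nil_iff]
          intro a ha
          simp [hrunv a ha]
        have h2 : rest'.filter (fun y => !(y == v)) = rest' := by
          rw [List.filter_eq_self]
          intro a ha
          simp only [Bool.not_eq_eq_eq_not, Bool.not_true, beq_eq_false_iff_ne, ne_eq]
          intro h; exact hvnot (h ▸ ha)
        rw [h1, h2, List.nil_append]
      -- counts
      have hcv : List.count v (v :: rest) = 1 + run.length := by
        have h1 : List.count v run = run.length :=
          List.count_eq_length.mpr (fun b hb => ((hrunv b hb) ▸ rfl : v = b))
        have h2 : List.count v rest' = 0 := List.count_eq_zero.mpr hvnot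
        rw [List.count_cons_self, ← hsplit, List.count_append, h1, h2]
        omega
      have hcw : ∀ w ∈ PySem.Set.ofList rest', List.count w (v :: rest) = List.count w rest' := by
        intro w hw
        have hwmem : w ∈ rest' := (PySem.Set.mem_ofList _ _).mp hw
        have hwv : w ≠ v := fun h => hvnot (h ▸ hwmem)
        rw [List.count_cons_of_ne (Ne.symm hwv), ← hsplit, List.count_append,
          List.count_eq_zero.mpr (fun hc => hwv (hrunv w hc)), Nat.zero_add]
      -- unfold one step of the A loop
      rw [hset, List.map_cons, hcv]
      have hmapc : (PySem.Set.ofList rest').map (fun w => (w, (List.count w (v :: rest) : Int)))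
          = (PySem.Set.ofList rest').map (fun w => (w, (List.count w rest' : Int))) := by
        apply List.map_congr_left
        intro w hw
        rw [hcw w hw]
      rw [hmapc, pvALoop_cons]
      by_cases hk : i + 1 > k
      · rw [if_pos hk]
        -- every element misses the cutoff: pvCntI = 0
        have : pvCntI k i (v :: rest) = 0 := by
          unfold pvCntI
          rw [List.filter_eq_nil_iff.mpr]
          · rfl
          · intro x _
            have := pvGt_nonneg (v :: rest) x
            simp only [decide_eq_true_eq]
            omega
        rw [this, add_zero]
      · rw [if_neg hk]
        have hik : i + 1 ≤ k := not_lt.mp hk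
        have hlen : rest'.length ≤ n := by
          have h1 : rest'.length ≤ rest.length := List.length_dropWhile_le _ _
          have h2 : (v :: rest).length ≤ n + 1 := hl
          simp only [List.length_cons] at h2
          omega
        have hih := ih rest' hlen hprest' (i + ((1 + run.length : Nat) : Int))
        have harg2 : i + 1 + ((1 + run.length : Nat) : Int)
            = i + ((1 + run.length : Nat) : Int) + 1 := by push_cast; ring
        rw [harg2, hih]
        have hdec := pvCntI_cons k i v run rest' hrunv hlt' hik
        rw [← hsplit, hdec]
        ring

-- in a descending list, at most j elements beat the element at index j
theorem pvGt_getElem_le (s : List Int) (hp : s.Pairwise (fun a b => b ≤ a))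
    (j : Nat) (hj : j < s.length) : pvGt s s[j] ≤ (j : Int) := by
  unfold pvGt
  have hmono := List.pairwise_iff_getElem.mp hp
  set piv := s[j] with hpiv
  have hnat : (s.filter (fun y => decide (piv < y))).length ≤ j := by
    have hstep : (s.filter (fun y => decide (piv < y))).length
        = ((s.take j).filter (fun y => decide (piv < y))).length
          + ((s.drop j).filter (fun y => decide (piv < y))).length := by
      conv_lhs => rw [← List.take_append_drop j s]
      rw [List.filter_append, List.length_append]
    have hdrop : (s.drop j).filter (fun y => decide (piv < y)) = [] := by
      rw [List.filter_eq_nil_iff]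
      intro y hy
      rw [List.mem_iff_getElem] at hy
      obtain ⟨m, hm, rfl⟩ := hy
      have hmlen : j + m < s.length := by
        have := List.length_drop (l := s) (i := j)
        omega
      rw [List.getElem_drop]
      have hle : s[j + m] ≤ piv := by
        rcases Nat.eq_zero_or_pos m with h0 | h0
        · subst h0; rw [hpiv]; simp
        · rw [hpiv]; exact hmono j (j + m) hj hmlen (by omega)
      simpa using not_lt_of_ge hle
    have htake : ((s.take j).filter (fun y => decide (piv < y))).length ≤ j := by
      calc ((s.take j).filter _).length ≤ (s.take j).length := List.length_filter_le _ _
        _ ≤ j := by simp [List.length_take]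
    rw [hstep, hdrop]
    simpa using htake
  exact_mod_cast hnat

-- in a descending list, anything below the element at index j is beaten by j+1 elements
theorem pvGt_lt_getElem_ge (s : List Int) (hp : s.Pairwise (fun a b => b ≤ a))
    (j : Nat) (hj : j < s.length) (x : Int) (hx : x < s[j]) :
    ((j : Int) + 1) ≤ pvGt s x := by
  unfold pvGt
  have hmono := List.pairwise_iff_getElem.mp hp
  have hnat : j + 1 ≤ (s.filter (fun y => decide (x < y))).length := by
    have hstep : (s.filter (fun y => decide (x < y))).length
        = ((s.take (j + 1)).filter (fun y => decide (x < y))).length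
          + ((s.drop (j + 1)).filter (fun y => decide (x < y))).length := by
      conv_lhs => rw [← List.take_append_drop (j + 1) s]
      rw [List.filter_append, List.length_append]
    have htake : (s.take (j + 1)).filter (fun y => decide (x < y)) = s.take (j + 1) := by
      rw [List.filter_eq_self]
      intro a ha
      rw [List.mem_iff_getElem] at ha
      obtain ⟨m, hm, rfl⟩ := ha
      have hmj : m ≤ j := by
        simp only [List.length_take] at hm
        omega
      have hmlen : m < s.length := by omega
      rw [List.getElem_take]
      have hge : s[j] ≤ s[m] := by
        rcases Nat.lt_or_ge m j with h0 | h0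
        · exact hmono m j hmlen hj h0
        · have : m = j := by omega
          subst this; exact le_refl _
      simp only [decide_eq_true_eq]
      omega
    have hlen : (s.take (j + 1)).length = j + 1 := by
      rw [List.length_take]; omega
    rw [hstep, htake, hlen]
    omega
  exact_mod_cast hnat

-- ===== VERDICT (by name: the statement is the Claim_ definition above) =====
theorem countLevelUpPlayers_spec : Claim_equal_countLevelUpPlayers := by
  unfold Claim_equal_countLevelUpPlayers
  intro k num scores _
  unfold Spec_countLevelUpPlayers countLevelUpPlayers countLevelUpPlayers_alt
  by_cases h : num ≥ 100000
  · rw [if_pos h, if_pos h]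
  · rw [if_neg h, if_neg h]
    set s := PySem.List.sorted scores (fun x => x) true with hs
    have hperm : s.Perm scores := PySem.List.sorted_perm scores (fun x => x) true
    have hpair : s.Pairwise (fun a b => b ≤ a) := by
      simpa using PySem.List.sorted_pairwise_rev scores (fun x => x)
    have hlens : s.length = scores.length := hperm.length_eq
    -- A's value is pvCntI k 0 s
    have hA : pvALoop k ((s.foldl pvCountStep PySem.Dict.empty).items) 0 1 = pvCntI k 0 s := by
      rw [pvCounter_eq, PySem.Dict.items_counter]
      have := pv_loop_cnt k s.length s le_rfl hpair 0
      simpa using this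
    show some (pvALoop k ((s.foldl pvCountStep PySem.Dict.empty).items) 0 1) = _
    rw [hA]
    by_cases hk0 : k ≤ 0
    · rw [if_pos hk0]
      congr 1
      unfold pvCntI
      rw [List.filter_eq_nil_iff.mpr]
      · rfl
      · intro x _
        have := pvGt_nonneg s x
        simp only [decide_eq_true_eq]
        omega
    · rw [if_neg hk0]
      by_cases hkn : k ≥ (scores.length : Int)
      · rw [if_pos hkn]
        congr 1
        unfold pvCntI
        rw [List.filter_eq_self.mpr, ← hlens]
        intro x hx
        -- x itself never beats x, so pvGt s x < s.length ≤ k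
        have hlt : (s.filter (fun y => decide (x < y))).length < s.length := by
          rw [List.length_filter_lt_length_iff_exists]
          exact ⟨x, hx, by simp⟩
        unfold pvGt
        simp only [decide_eq_true_eq]
        omega
      · rw [if_neg hkn]
        -- main case: 0 < k < n; pivot = s[k-1]
        have hk1 : 1 ≤ k := by omega
        have hklt : k < (s.length : Int) := by omega
        have hjlen : (k - 1).toNat < s.length := by omega
        have hjk : (((k - 1).toNat : Nat) : Int) = k - 1 := by omega
        have hpg : PySem.List.pyGet? s (k - 1) = some s[(k - 1).toNat] := by
          rw [PySem.List.pyGet?_of_nonneg s (show (0:Int) ≤ k - 1 by omega)]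
          exact List.getElem?_eq_getElem hjlen
        rw [hpg, Option.getD_some]
        congr 1
        -- pointwise, rank-below-k means being ≥ the pivot …
        have hfc : s.filter (fun x => decide (0 + pvGt s x < k))
            = s.filter (fun x => decide (s[(k - 1).toNat] ≤ x)) := by
          apply List.filter_congr
          intro x _
          rw [decide_eq_decide]
          constructor
          · intro hlt
            by_contra hge
            have := pvGt_lt_getElem_ge s hpair (k - 1).toNat hjlen x (by omega)
            omega
          · intro hge
            have hsub : pvGt s x ≤ pvGt s s[(k - 1).toNat] := by
              unfold pvGt
              have hsl := List.monotone_filter_right s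
                (p := fun y => decide (x < y)) (q := fun y => decide (s[(k - 1).toNat] < y))
                (fun a ha => by
                  simp only [decide_eq_true_eq] at ha ⊢
                  omega)
              exact_mod_cast hsl.length_le
            have := pvGt_getElem_le s hpair (k - 1).toNat hjlen
            omega
        -- … and B's filter over scores equals the same filter over s (a permutation)
        have hfin : (s.filter (fun x => decide (0 + pvGt s x < k))).length
            = (scores.filter (fun x => decide (s[(k - 1).toNat] ≤ x))).length :=
          (congrArg List.length hfc).trans ((hperm.filter _).length_eq)
        unfold pvCntI
        exact_mod_cast hfin
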